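-- pv_equiv track=rewrite | github.com/BrianMarre/picongpuAtomicPhysicsTools | ReadingOutputFromFLYonPIC_v2/AtomicConfigNumberConversion.py | getChargeState
-- ===== SOURCE A (Python) =====
-- def g(n):
--     return 2*n**2
--
-- def numberOfOccupationNumbersInShell(n, atomicNumber):
--     return min(g(n), atomicNumber)+1
--
-- def stepLength(n, atomicNumber):
--      stepLength = 1
--      for i in range(1,n):
--         stepLength *= numberOfOccupationNumbersInShell(i, atomicNumber)
--
--      return stepLength
--
-- def getChargeState(atomicConfigNumber, atomicNumber, numLevels):
--     chargeState = atomicNumber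
--
--     for n in range(numLevels, 0, -1):
--         # calculate current stepLength
--         currentStepLength = stepLength(n, atomicNumber)
--
--         # get occupation number
--         occupationNumber = atomicConfigNumber // currentStepLength
--         chargeState -= occupationNumber
--
--         # remove contribution of current level
--         atomicConfigNumber -= currentStepLength * occupationNumber
--
--     return chargeState
-- ===== SOURCE B (Python) =====
-- def getChargeState(atomicConfigNumber, atomicNumber, numLevels):
--     # one pass: prefix products of shell sizes, then a single decoding loop
--     steps = []
--     prod = 1
--     for i in range(numLevels):
--         steps.append(prod)
--         prod *= min(2 * (i + 1) ** 2, atomicNumber) + 1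
--
--     chargeState = atomicNumber
--     rem = atomicConfigNumber
--     for s in reversed(steps):
--         occ = rem // s
--         chargeState -= occ
--         rem -= s * occ
--     return chargeState
-- ===== Notes on version B (the rewrite author's own statement) =====
-- stated objective: faster
-- what changed: B computes all stepLength values as prefix products in one pass instead of recomputing the product from scratch for every level, then decodes in a single loop
-- outside the precondition, e.g. on getChargeState(5, -1, 2): A raises ZeroDivisionError, B raises ZeroDivisionError
import Mathlib
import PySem

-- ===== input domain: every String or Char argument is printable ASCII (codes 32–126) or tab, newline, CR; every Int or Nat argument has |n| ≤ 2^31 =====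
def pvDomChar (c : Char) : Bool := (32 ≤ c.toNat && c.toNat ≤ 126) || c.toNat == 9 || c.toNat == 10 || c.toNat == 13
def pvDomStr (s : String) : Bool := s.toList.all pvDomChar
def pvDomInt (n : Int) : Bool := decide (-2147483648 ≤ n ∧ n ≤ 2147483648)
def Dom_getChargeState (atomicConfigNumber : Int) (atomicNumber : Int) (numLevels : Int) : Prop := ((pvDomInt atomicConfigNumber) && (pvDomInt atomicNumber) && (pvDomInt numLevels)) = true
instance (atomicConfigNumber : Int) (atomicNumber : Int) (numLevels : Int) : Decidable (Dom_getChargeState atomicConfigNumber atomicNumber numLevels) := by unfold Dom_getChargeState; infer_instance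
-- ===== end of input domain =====

-- B replaces A's per-level recomputation of stepLength (O(numLevels^2) multiplications)
-- by one prefix-product pass followed by a single decoding loop (O(numLevels)).

-- ===== PORT A =====
def gA (n : Int) : Int := 2 * n ^ 2

def numOccA (n atomicNumber : Int) : Int := min (gA n) atomicNumber + 1

def stepLengthA (n atomicNumber : Int) : Int :=
  (PySem.List.pyRange 1 n 1).foldl (fun s i => s * numOccA i atomicNumber) 1

def getChargeState (atomicConfigNumber : Int) (atomicNumber : Int) (numLevels : Int) : Int :=
  ((PySem.List.pyRange numLevels 0 (-1)).foldl
    (fun (p : Int × Int) n =>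
      let cs := stepLengthA n atomicNumber
      let occ := PySem.Int.floordiv p.2 cs
      (p.1 - occ, p.2 - cs * occ))
    (atomicNumber, atomicConfigNumber)).1

-- ===== PORT B =====
def getChargeState_alt (atomicConfigNumber : Int) (atomicNumber : Int) (numLevels : Int) : Int :=
  -- one pass building the prefix products (steps, prod), then a single decoding loop
  let bp := (PySem.List.pyRange 0 numLevels 1).foldl
    (fun (p : List Int × Int) i => (p.1 ++ [p.2], p.2 * (min (2 * (i + 1) ^ 2) atomicNumber + 1)))
    ([], 1)
  ((bp.1.reverse).foldl
    (fun (p : Int × Int) s =>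
      let occ := PySem.Int.floordiv p.2 s
      (p.1 - occ, p.2 - s * occ))
    (atomicNumber, atomicConfigNumber)).1

-- ===== PRECONDITION & SPEC =====
-- Pre_ excludes exactly the inputs where Python A raises ZeroDivisionError: atomicNumber = -1
-- with numLevels ≥ 2 makes stepLength 0 (B raises there too).
def Pre_getChargeState (atomicConfigNumber : Int) (atomicNumber : Int) (numLevels : Int) : Prop :=
  ¬ (atomicNumber = -1 ∧ 2 ≤ numLevels)
instance (atomicConfigNumber : Int) (atomicNumber : Int) (numLevels : Int) : Decidable (Pre_getChargeState atomicConfigNumber atomicNumber numLevels) := by unfold Pre_getChargeState; infer_instance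

def pvWitness_getChargeState : Int × Int × Int := (37, 6, 4)

def Spec_getChargeState (atomicConfigNumber : Int) (atomicNumber : Int) (numLevels : Int) (out : Int) : Prop := out = getChargeState_alt atomicConfigNumber atomicNumber numLevels
instance (atomicConfigNumber : Int) (atomicNumber : Int) (numLevels : Int) (out : Int) : Decidable (Spec_getChargeState atomicConfigNumber atomicNumber numLevels out) := by unfold Spec_getChargeState; infer_instance

-- ===== CLAIM (what is proved, stated in full; the proofs are below) =====
def Claim_equal_getChargeState : Prop := ∀ (atomicConfigNumber : Int) (atomicNumber : Int) (numLevels : Int), Dom_getChargeState atomicConfigNumber atomicNumber numLevels → Pre_getChargeState atomicConfigNumber atomicNumber numLevels → Spec_getChargeState atomicConfigNumber atomicNumber numLevels (getChargeState atomicConfigNumber atomicNumber numLevels)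

-- ===== LEMMAS AND PROOFS =====

-- the prefix product Q Z k = stepLength (k+1) = ∏_{i=1..k} numOcc i
def Q (Z : Int) : Nat → Int
  | 0 => 1
  | k + 1 => Q Z k * (min (2 * ((k : Int) + 1) ^ 2) Z + 1)

lemma stepLengthA_eq_Q (k : Nat) (Z : Int) : stepLengthA ((k : Int) + 1) Z = Q Z k := by
  induction k with
  | zero =>
    simp [stepLengthA, Q, PySem.List.pyRange_one_eq_nil (by norm_num : (1 : Int) ≥ 1)]
  | succ k ih =>
    have h : PySem.List.pyRange 1 ((k : Int) + 1 + 1) 1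
        = PySem.List.pyRange 1 ((k : Int) + 1) 1 ++ [(k : Int) + 1] :=
      PySem.List.pyRange_one_succ_right (by omega)
    unfold stepLengthA
    push_cast
    rw [h, List.foldl_append]
    unfold stepLengthA at ih
    rw [ih]
    simp [Q, numOccA, gA]

-- B's building loop produces exactly the prefix products
lemma build_eq (Z : Int) (n : Nat) :
    (PySem.List.pyRange 0 (n : Int) 1).foldl
      (fun (p : List Int × Int) i => (p.1 ++ [p.2], p.2 * (min (2 * (i + 1) ^ 2) Z + 1)))
      ([], 1)
    = ((List.range n).map (Q Z), Q Z n) := by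
  induction n with
  | zero =>
    simp [PySem.List.pyRange_one_eq_nil (by norm_num : (0 : Int) ≥ 0), Q]
  | succ n ih =>
    have h : PySem.List.pyRange 0 ((n : Int) + 1) 1
        = PySem.List.pyRange 0 (n : Int) 1 ++ [(n : Int)] :=
      PySem.List.pyRange_one_succ_right (by omega)
    push_cast
    rw [h, List.foldl_append, ih]
    simp [List.range_succ, Q]

-- A's countdown of stepLengths is the reverse of B's prefix-product list
lemma countdown_eq (Z : Int) (n : Nat) :
    (PySem.List.pyRange (n : Int) 0 (-1)).map (fun m => stepLengthA m Z)
    = ((List.range n).map (Q Z)).reverse := by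
  rw [PySem.List.pyRange_neg_one_eq_reverse]
  norm_num
  rw [PySem.List.pyRange_one]
  norm_num
  intro k _
  rw [add_comm (1 : Int) (k : Int), stepLengthA_eq_Q]

theorem getChargeState_eq_alt (atomicConfigNumber atomicNumber numLevels : Int) :
    getChargeState atomicConfigNumber atomicNumber numLevels
    = getChargeState_alt atomicConfigNumber atomicNumber numLevels := by
  unfold getChargeState getChargeState_alt
  by_cases hn : numLevels ≤ 0
  · rw [PySem.List.pyRange_neg_one_eq_nil hn, PySem.List.pyRange_one_eq_nil (by omega)]
    simp
  · rw [not_le] at hn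
    obtain ⟨n, rfl⟩ : ∃ n : Nat, numLevels = (n : Int) := ⟨numLevels.toNat, (Int.toNat_of_nonneg (by omega)).symm⟩
    rw [build_eq atomicNumber n]
    have hA : (PySem.List.pyRange (n : Int) 0 (-1)).foldl
        (fun (p : Int × Int) m =>
          let cs := stepLengthA m atomicNumber
          let occ := PySem.Int.floordiv p.2 cs
          (p.1 - occ, p.2 - cs * occ))
        (atomicNumber, atomicConfigNumber)
        = ((PySem.List.pyRange (n : Int) 0 (-1)).map (fun m => stepLengthA m atomicNumber)).foldl
          (fun (p : Int × Int) s =>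
            let occ := PySem.Int.floordiv p.2 s
            (p.1 - occ, p.2 - s * occ))
          (atomicNumber, atomicConfigNumber) := by
      rw [List.foldl_map]
    rw [hA, countdown_eq]

-- ===== VERDICT (by name: the statement is the Claim_ definition above) =====
theorem getChargeState_spec : Claim_equal_getChargeState := by
  intro acn Z nL _ _
  unfold Spec_getChargeState
  exact getChargeState_eq_alt acn Z nL
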